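-- pv_equiv track=rewrite | github.com/minduy1402/Master_Final_Report | convert_md_to_latex.py | convert_headings
-- ===== SOURCE A (Python) =====
-- def convert_headings(content):
--     """Convert Markdown headings (#, ##, ###, ####) to LaTeX"""
--
--     # We need to be careful - only convert lines that start with # but are not in LaTeX already
--     # Skip lines that already have \chapter, \section, etc.
--
--     lines = content.split('\n')
--     result = []
--
--     for line in lines:
--         # Skip if line already contains LaTeX sectioning commands
--         if '\\chapter{' in line or '\\section{' in line or '\\subsection{' in line or '\\subsubsection{' in line:
--             result.append(line)
--             continue
--
--         # Convert #### to \subsubsection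
--         if line.strip().startswith('#### '):
--             heading = line.strip()[5:].strip()
--             result.append(f'\\subsubsection{{{heading}}}')
--         # Convert ### to \subsection
--         elif line.strip().startswith('### '):
--             heading = line.strip()[4:].strip()
--             result.append(f'\\subsection{{{heading}}}')
--         # Convert ## to \section
--         elif line.strip().startswith('## '):
--             heading = line.strip()[3:].strip()
--             result.append(f'\\section{{{heading}}}')
--         # Convert # to \chapter (but be careful with this)
--         elif line.strip().startswith('# ') and not line.strip().startswith('## '):
--             heading = line.strip()[2:].strip()
--             # Only convert if it looks like a real chapter heading
--             if len(heading) > 0 and not heading.startswith('#'):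
--                 result.append(f'\\chapter{{{heading}}}')
--             else:
--                 result.append(line)
--         else:
--             result.append(line)
--
--     return '\n'.join(result)
-- ===== SOURCE B (Python) =====
-- CMDS = {1: 'chapter', 2: 'section', 3: 'subsection', 4: 'subsubsection'}
--
--
-- def _convert_line(line):
--     if ('\\chapter{' in line or '\\section{' in line
--             or '\\subsection{' in line or '\\subsubsection{' in line):
--         return line
--     s = line.strip()
--     n = 0
--     while n < len(s) and s[n] == '#':
--         n += 1
--     if not (1 <= n <= 4 and n < len(s) and s[n] == ' '):
--         return line
--     heading = s[n + 1:].strip()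
--     if n == 1 and (not heading or heading.startswith('#')):
--         return line
--     return '\\%s{%s}' % (CMDS[n], heading)
--
--
-- def convert_headings(content):
--     return '\n'.join(_convert_line(line) for line in content.split('\n'))
-- ===== Notes on version B (the rewrite author's own statement) =====
-- stated objective: idiomatic
-- what changed: Replaces A's elif chain of startswith tests (each re-stripping the line) by a single count of leading hash characters in the stripped line, one space check at that index, and a table lookup of the LaTeX command, with the per-line logic factored into a helper and the result built by join over a generator.
import Mathlib
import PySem

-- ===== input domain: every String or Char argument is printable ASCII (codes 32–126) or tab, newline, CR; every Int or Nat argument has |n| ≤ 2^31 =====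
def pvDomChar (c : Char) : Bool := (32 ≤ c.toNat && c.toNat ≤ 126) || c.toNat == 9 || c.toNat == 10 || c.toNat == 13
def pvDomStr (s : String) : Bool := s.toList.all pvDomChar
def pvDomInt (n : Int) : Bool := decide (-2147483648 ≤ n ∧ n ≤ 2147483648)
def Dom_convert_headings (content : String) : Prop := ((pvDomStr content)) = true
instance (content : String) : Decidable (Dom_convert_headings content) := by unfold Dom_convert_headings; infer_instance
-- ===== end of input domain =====

-- B replaces A's repeated-strip elif chain by one leading-'#'-count per line with a table lookup (objective: idiomatic).


-- ===== PORT A =====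
-- per-line body of A's for-loop (the branch chain, verbatim)
def pvLineA (line : List Char) : List Char :=
  if PySem.Chars.isIn "\\chapter{".toList line || PySem.Chars.isIn "\\section{".toList line ||
     PySem.Chars.isIn "\\subsection{".toList line || PySem.Chars.isIn "\\subsubsection{".toList line then
    line
  else if PySem.Chars.startswith (PySem.Chars.strip line) "#### ".toList then
    "\\subsubsection{".toList ++ PySem.Chars.strip (PySem.List.slice (PySem.Chars.strip line) (some 5) none) ++ "}".toList
  else if PySem.Chars.startswith (PySem.Chars.strip line) "### ".toList then
    "\\subsection{".toList ++ PySem.Chars.strip (PySem.List.slice (PySem.Chars.strip line) (some 4) none) ++ "}".toList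
  else if PySem.Chars.startswith (PySem.Chars.strip line) "## ".toList then
    "\\section{".toList ++ PySem.Chars.strip (PySem.List.slice (PySem.Chars.strip line) (some 3) none) ++ "}".toList
  else if PySem.Chars.startswith (PySem.Chars.strip line) "# ".toList &&
          !PySem.Chars.startswith (PySem.Chars.strip line) "## ".toList then
    let heading := PySem.Chars.strip (PySem.List.slice (PySem.Chars.strip line) (some 2) none)
    if heading.length > 0 && !PySem.Chars.startswith heading "#".toList then
      "\\chapter{".toList ++ heading ++ "}".toList
    else line
  else line

def convert_headings (content : String) : String :=
  String.ofList (PySem.Chars.join "\n".toList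
    ((PySem.Chars.splitOn content.toList "\n".toList).foldl (fun r l => r ++ [pvLineA l]) []))

-- ===== PORT B =====
def pvCMDS : PySem.Dict Int String :=
  PySem.Dict.ofList [(1, "chapter"), (2, "section"), (3, "subsection"), (4, "subsubsection")]

-- the 'while n < len(s) and s[n] == '#': n += 1' counter of Source B
def pvCountHash : List Char → Nat
  | [] => 0
  | c :: cs => if c == '#' then pvCountHash cs + 1 else 0

def pvLineB (line : List Char) : List Char :=
  if PySem.Chars.isIn "\\chapter{".toList line || PySem.Chars.isIn "\\section{".toList line ||
     PySem.Chars.isIn "\\subsection{".toList line || PySem.Chars.isIn "\\subsubsection{".toList line then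
    line
  else
    let s := PySem.Chars.strip line
    let n := pvCountHash s
    if ¬ (1 ≤ n ∧ n ≤ 4 ∧ n < s.length ∧ PySem.List.pyGet? s (n : Int) = some ' ') then line
    else
      let heading := PySem.Chars.strip (PySem.List.slice s (some ((n + 1 : Nat) : Int)) none)
      if n = 1 ∧ (heading = [] ∨ PySem.Chars.startswith heading "#".toList) then line
      else "\\".toList ++ (pvCMDS.getD (n : Int) "").toList ++ "{".toList ++ heading ++ "}".toList

def convert_headings_alt (content : String) : String :=
  String.ofList (PySem.Chars.join "\n".toList
    ((PySem.Chars.splitOn content.toList "\n".toList).map pvLineB))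

-- ===== PRECONDITION & SPEC =====
def Spec_convert_headings (content : String) (out : String) : Prop := out = convert_headings_alt content
instance (content : String) (out : String) : Decidable (Spec_convert_headings content out) := by unfold Spec_convert_headings; infer_instance

-- ===== CLAIM (what is proved, stated in full; the proofs are below) =====
def Claim_equal_convert_headings : Prop := ∀ (content : String), Dom_convert_headings content → Spec_convert_headings content (convert_headings content)

-- ===== LEMMAS AND PROOFS =====

theorem pvBody_eq (line t : List Char) :
    (if PySem.Chars.startswith t "#### ".toList then
       "\\subsubsection{".toList ++ PySem.Chars.strip (PySem.List.slice t (some 5) none) ++ "}".toList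
     else if PySem.Chars.startswith t "### ".toList then
       "\\subsection{".toList ++ PySem.Chars.strip (PySem.List.slice t (some 4) none) ++ "}".toList
     else if PySem.Chars.startswith t "## ".toList then
       "\\section{".toList ++ PySem.Chars.strip (PySem.List.slice t (some 3) none) ++ "}".toList
     else if PySem.Chars.startswith t "# ".toList && !PySem.Chars.startswith t "## ".toList then
       (let heading := PySem.Chars.strip (PySem.List.slice t (some 2) none)
        if heading.length > 0 && !PySem.Chars.startswith heading "#".toList then
          "\\chapter{".toList ++ heading ++ "}".toList
        else line)
     else line)
    =
    (let n := pvCountHash t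
     if ¬ (1 ≤ n ∧ n ≤ 4 ∧ n < t.length ∧ PySem.List.pyGet? t (n : Int) = some ' ') then line
     else
       let heading := PySem.Chars.strip (PySem.List.slice t (some ((n + 1 : Nat) : Int)) none)
       if n = 1 ∧ (heading = [] ∨ PySem.Chars.startswith heading "#".toList) then line
       else "\\".toList ++ (pvCMDS.getD (n : Int) "").toList ++ "{".toList ++ heading ++ "}".toList) := by
  rcases t with _ | ⟨c0, t⟩
  · simp [PySem.Chars.startswith, pvCountHash]
  by_cases h0 : c0 = '#'
  case neg => simp [PySem.Chars.startswith, pvCountHash, h0, Ne.symm h0]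
  subst h0
  rcases t with _ | ⟨c1, t⟩
  · simp [PySem.Chars.startswith, pvCountHash]
  by_cases h1 : c1 = '#'
  case neg =>
    by_cases hs1 : c1 = ' '
    · subst hs1
      simp [PySem.Chars.startswith, pvCountHash, List.isPrefixOf,
            PySem.List.pyGet?, PySem.List.pyIdx?]
      generalize PySem.Chars.strip (PySem.List.slice ('#' :: ' ' :: t) (some 2)) = h
      have hc : (pvCMDS.getD 1 "").toList = ['c','h','a','p','t','e','r'] := by decide
      by_cases hE : h = []
      · simp [hE]
      by_cases hP : ['#'] <+: h
      · simp [hE, hP, List.isPrefixOf_iff_prefix]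
      · simp [hE, hP, List.isPrefixOf_iff_prefix, List.length_pos_iff, hc]
    · simp [PySem.Chars.startswith, pvCountHash, h1, Ne.symm h1, hs1, Ne.symm hs1,
            PySem.List.pyGet?, PySem.List.pyIdx?]
  subst h1
  rcases t with _ | ⟨c2, t⟩
  · simp [PySem.Chars.startswith, pvCountHash]
  by_cases h2 : c2 = '#'
  case neg =>
    by_cases hs2 : c2 = ' '
    · subst hs2
      simp [PySem.Chars.startswith, pvCountHash, List.isPrefixOf,
            PySem.List.pyGet?, PySem.List.pyIdx?,
            (by decide : (pvCMDS.getD 2 "").toList = ['s','e','c','t','i','o','n'])]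
      intro hx
      exact absurd (by rw [if_pos (by omega)]; simp) hx
    · simp [PySem.Chars.startswith, pvCountHash, h2, Ne.symm h2, Ne.symm hs2,
            PySem.List.pyGet?, PySem.List.pyIdx?]
      intro hx
      rw [if_pos (by omega)] at hx
      simp at hx
      exact absurd hx hs2
  subst h2
  rcases t with _ | ⟨c3, t⟩
  · simp [PySem.Chars.startswith, pvCountHash]
  by_cases h3 : c3 = '#'
  case neg =>
    by_cases hs3 : c3 = ' '
    · subst hs3
      simp [PySem.Chars.startswith, pvCountHash, List.isPrefixOf,
            PySem.List.pyGet?, PySem.List.pyIdx?,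
            (by decide : (pvCMDS.getD 3 "").toList = ['s','u','b','s','e','c','t','i','o','n'])]
      intro hx
      exact absurd (by rw [if_pos (by omega)]; simp) hx
    · simp [PySem.Chars.startswith, pvCountHash, h3, Ne.symm h3, Ne.symm hs3,
            PySem.List.pyGet?, PySem.List.pyIdx?]
      intro hx
      rw [if_pos (by omega)] at hx
      simp at hx
      exact absurd hx hs3
  subst h3
  rcases t with _ | ⟨c4, t⟩
  · simp [PySem.Chars.startswith, pvCountHash]
  by_cases h4 : c4 = '#'
  case neg =>
    by_cases hs4 : c4 = ' '
    · subst hs4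
      simp [PySem.Chars.startswith, pvCountHash, List.isPrefixOf,
            PySem.List.pyGet?, PySem.List.pyIdx?,
            (by decide : (pvCMDS.getD 4 "").toList = ['s','u','b','s','u','b','s','e','c','t','i','o','n'])]
      intro hx
      exact absurd (by rw [if_pos (by omega)]; simp) hx
    · simp [PySem.Chars.startswith, pvCountHash, h4, Ne.symm hs4,
            PySem.List.pyGet?, PySem.List.pyIdx?]
      intro hx
      rw [if_pos (by omega)] at hx
      simp at hx
      exact absurd hx hs4
  subst h4
  -- five or more leading '#': neither converts
  simp [PySem.Chars.startswith, pvCountHash, PySem.List.pyGet?, PySem.List.pyIdx?]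

theorem pvLine_eq (line : List Char) : pvLineA line = pvLineB line := by
  unfold pvLineA pvLineB
  by_cases hG : (PySem.Chars.isIn "\\chapter{".toList line || PySem.Chars.isIn "\\section{".toList line ||
     PySem.Chars.isIn "\\subsection{".toList line || PySem.Chars.isIn "\\subsubsection{".toList line) = true
  · simp only [hG, if_pos]
  · simp only [hG, if_neg, Bool.not_eq_true]
    exact pvBody_eq line (PySem.Chars.strip line)

-- ===== VERDICT (by name: the statement is the Claim_ definition above) =====
theorem convert_headings_spec : Claim_equal_convert_headings := by
  intro content _
  show _ = _
  unfold convert_headings convert_headings_alt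
  rw [PySem.List.foldl_append_singleton_eq_map, funext pvLine_eq]
  simp
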